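-- pv_equiv track=rewrite | github.com/BanmaXM/Mindgame | Reference_code/large_model_game_arena/recalculate_agent0_winrate.py | calculate_round_results
-- ===== SOURCE A (Python) =====
-- from typing import Dict, List, Tuple, Any
--
-- def calculate_round_results(decisions: Dict[str, Dict[str, str]]) -> Dict[str, int]:
--     """
--     根据决策计算一轮的结果
--     """
--     results = {"0": 0, "1": 0, "2": 0}
--
--     # 计算每对玩家的结果
--     pairs = [("0", "1"), ("0", "2"), ("1", "2")]
--
--     for p1, p2 in pairs:
--         # 获取玩家1对玩家2的决策
--         p1_decision = decisions.get(p1, {}).get(p2, "cooperate")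
--         # 获取玩家2对玩家1的决策
--         p2_decision = decisions.get(p2, {}).get(p1, "cooperate")
--
--         # 计算得分
--         if p1_decision == "cooperate" and p2_decision == "cooperate":
--             # 双方合作，各得3分
--             results[p1] += 3
--             results[p2] += 3
--         elif p1_decision == "cooperate" and p2_decision == "defect":
--             # p1合作，p2背叛，p1得0分，p2得5分
--             results[p1] += 0
--             results[p2] += 5
--         elif p1_decision == "defect" and p2_decision == "cooperate":
--             # p1背叛，p2合作，p1得5分，p2得0分
--             results[p1] += 5
--             results[p2] += 0
--         elif p1_decision == "defect" and p2_decision == "defect":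
--             # 双方背叛，各得1分
--             results[p1] += 1
--             results[p2] += 1
--
--     return results
-- ===== SOURCE B (Python) =====
-- def _score(mine, theirs):
--     # payoff to the player whose own decision is `mine` against an opponent deciding `theirs`;
--     # unrecognized decision strings score nothing for either side
--     if mine not in ("cooperate", "defect") or theirs not in ("cooperate", "defect"):
--         return 0
--     if mine == "cooperate":
--         return 3 if theirs == "cooperate" else 0
--     return 5 if theirs == "cooperate" else 1
--
-- def calculate_round_results(decisions):
--     """
--     根据决策计算一轮的结果 (per-player accumulation instead of per-pair updates)
--     """
--     players = ["0", "1", "2"]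
--     def dec(p, q):
--         return decisions.get(p, {}).get(q, "cooperate")
--     return {p: sum(_score(dec(p, q), dec(q, p)) for q in players if q != p)
--             for p in players}
-- ===== Notes on version B (the rewrite author's own statement) =====
-- stated objective: alternative
-- what changed: B computes each player's total independently as a sum over its two opponents of a single-player payoff function _score(mine, theirs), building the result dict in one comprehension, instead of A's loop over the three pairs that mutates a results dict with two updates per pair via an if/elif cascade.
import Mathlib
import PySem

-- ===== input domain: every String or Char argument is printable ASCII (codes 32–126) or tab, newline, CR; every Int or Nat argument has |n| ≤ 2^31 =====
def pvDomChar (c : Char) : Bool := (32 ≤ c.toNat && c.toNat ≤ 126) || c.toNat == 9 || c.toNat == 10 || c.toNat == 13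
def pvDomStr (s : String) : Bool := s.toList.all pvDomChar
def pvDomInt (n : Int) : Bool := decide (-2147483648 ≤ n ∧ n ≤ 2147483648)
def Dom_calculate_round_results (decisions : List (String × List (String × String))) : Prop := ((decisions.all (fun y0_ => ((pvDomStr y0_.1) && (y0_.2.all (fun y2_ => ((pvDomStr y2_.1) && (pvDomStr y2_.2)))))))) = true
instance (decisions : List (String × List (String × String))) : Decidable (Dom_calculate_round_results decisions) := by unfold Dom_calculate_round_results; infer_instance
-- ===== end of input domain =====

-- B scores each player independently (sum over its two opponents of a per-player payoff function) instead of A's per-pair double updates of a mutable results dict (objective: alternative).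


-- shared by both ports: decisions.get(p, {}).get(q, "cooperate")
def pvGetDecision (decisions : List (String × List (String × String))) (p q : String) : String :=
  (PySem.Dict.mk ((PySem.Dict.mk decisions).getD p [])).getD q "cooperate"

-- ===== PORT A =====
-- the body of A's for-loop: the if/elif cascade of score updates
def pvStepA (decisions : List (String × List (String × String)))
    (res : PySem.Dict String Int) (pr : String × String) : PySem.Dict String Int :=
  let d1 := pvGetDecision decisions pr.1 pr.2
  let d2 := pvGetDecision decisions pr.2 pr.1
  if d1 = "cooperate" ∧ d2 = "cooperate" then
    (res.modify pr.1 0 (· + 3)).modify pr.2 0 (· + 3)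
  else if d1 = "cooperate" ∧ d2 = "defect" then
    (res.modify pr.1 0 (· + 0)).modify pr.2 0 (· + 5)
  else if d1 = "defect" ∧ d2 = "cooperate" then
    (res.modify pr.1 0 (· + 5)).modify pr.2 0 (· + 0)
  else if d1 = "defect" ∧ d2 = "defect" then
    (res.modify pr.1 0 (· + 1)).modify pr.2 0 (· + 1)
  else res

def calculate_round_results (decisions : List (String × List (String × String))) : List (String × Int) :=
  (([("0", "1"), ("0", "2"), ("1", "2")] : List (String × String)).foldl
    (pvStepA decisions) (PySem.Dict.mk [("0", 0), ("1", 0), ("2", 0)])).items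

-- ===== PORT B =====
-- _score: payoff to the player deciding `mine` against an opponent deciding `theirs`
def pvScore (mine theirs : String) : Int :=
  if ¬(mine = "cooperate" ∨ mine = "defect") ∨ ¬(theirs = "cooperate" ∨ theirs = "defect") then 0
  else if mine = "cooperate" then (if theirs = "cooperate" then 3 else 0)
  else (if theirs = "cooperate" then 5 else 1)

-- B: one entry per player, its score summed over its two opponents
def calculate_round_results_alt (decisions : List (String × List (String × String))) : List (String × Int) :=
  let players : List String := ["0", "1", "2"]
  players.map (fun p =>
    (p, ((players.filter (fun q => q ≠ p)).map
          (fun q => pvScore (pvGetDecision decisions p q) (pvGetDecision decisions q p))).sum))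

-- ===== PRECONDITION & SPEC =====
def Spec_calculate_round_results (decisions : List (String × List (String × String))) (out : List (String × Int)) : Prop := out = calculate_round_results_alt decisions
instance (decisions : List (String × List (String × String))) (out : List (String × Int)) : Decidable (Spec_calculate_round_results decisions out) := by unfold Spec_calculate_round_results; infer_instance

-- ===== CLAIM =====
def Claim_equal_calculate_round_results : Prop := ∀ (decisions : List (String × List (String × String))), Dom_calculate_round_results decisions → Spec_calculate_round_results decisions (calculate_round_results decisions)

-- ===== LEMMAS AND PROOFS =====

-- with nodup keys, re-inserting the value already stored is the identity
lemma pv_insert_getD_self (d : PySem.Dict String Int) (k : String)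
    (hnd : d.keys.Nodup) (h : d.contains k = true) : d.insert k (d.getD k 0) = d := by
  obtain ⟨l⟩ := d
  apply PySem.Dict.ext
  simp only [PySem.Dict.keys] at hnd
  induction l with
  | nil => simp [PySem.Dict.contains] at h
  | cons p rest ih =>
    simp only [List.map_cons, List.nodup_cons] at hnd
    by_cases hk : p.1 = k
    · subst hk
      simp_all [PySem.Dict.insert, PySem.Dict.getD, PySem.Dict.get?, PySem.Dict.contains]
      conv_rhs => rw [← List.map_id rest]
      apply List.map_congr_left
      intro x hx
      have hxk : x.1 ≠ p.1 := by
        intro hx1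
        exact hnd.1 x.2 (hx1 ▸ (by simpa using hx))
      simp [hxk]
    · simp_all [PySem.Dict.insert, PySem.Dict.getD, PySem.Dict.get?, PySem.Dict.contains]
      obtain ⟨x, hx⟩ := h
      exact ih x hx

lemma pv_modify_add_zero (d : PySem.Dict String Int) (k : String)
    (hnd : d.keys.Nodup) (h : d.contains k = true) : d.modify k 0 (· + 0) = d := by
  have := pv_insert_getD_self d k hnd h
  simpa [PySem.Dict.modify] using this

-- A's loop step written with the per-player score function of B
lemma pv_stepA_eq_modify (decisions : List (String × List (String × String)))
    (res : PySem.Dict String Int) (pr : String × String)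
    (hnd : res.keys.Nodup) (h1 : res.contains pr.1 = true) (h2 : res.contains pr.2 = true) :
    pvStepA decisions res pr =
      (res.modify pr.1 0 (· + pvScore (pvGetDecision decisions pr.1 pr.2) (pvGetDecision decisions pr.2 pr.1))).modify
        pr.2 0 (· + pvScore (pvGetDecision decisions pr.2 pr.1) (pvGetDecision decisions pr.1 pr.2)) := by
  have hm1 : res.modify pr.1 0 (· + 0) = res := pv_modify_add_zero res pr.1 hnd h1
  have hm2 : res.modify pr.2 0 (· + 0) = res := pv_modify_add_zero res pr.2 hnd h2
  unfold pvStepA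
  generalize pvGetDecision decisions pr.1 pr.2 = d1
  generalize pvGetDecision decisions pr.2 pr.1 = d2
  have T : ∀ s : String, s = "cooperate" ∨ s = "defect" ∨
      (¬ s = "cooperate" ∧ ¬ s = "defect") := by
    intro s
    by_cases g1 : s = "cooperate"
    · exact Or.inl g1
    by_cases g2 : s = "defect"
    · exact Or.inr (Or.inl g2)
    · exact Or.inr (Or.inr ⟨g1, g2⟩)
  rcases T d1 with h | h | ⟨ha, hb⟩ <;> rcases T d2 with g | g | ⟨ga, gb⟩ <;>
    simp_all [pvScore]

-- keys of a modify chain are unchanged when the key is present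
lemma pv_keys_modify_contains (d : PySem.Dict String Int) (k : String) (v : Int → Int)
    (h : d.contains k = true) : (d.modify k 0 v).keys = d.keys := by
  rw [PySem.Dict.keys_modify, PySem.Dict.keys_insert_of_contains]
  exact h

-- ===== VERDICT =====
theorem calculate_round_results_spec : Claim_equal_calculate_round_results := by
  intro decisions _
  unfold Spec_calculate_round_results calculate_round_results calculate_round_results_alt
  simp only [List.foldl_cons, List.foldl_nil]
  set D0 : PySem.Dict String Int := PySem.Dict.mk [("0", 0), ("1", 0), ("2", 0)] with hD0
  have e1 := pv_stepA_eq_modify decisions D0 ("0", "1") (by decide) (by decide) (by decide)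
  rw [e1]
  set s01 := pvScore (pvGetDecision decisions "0" "1") (pvGetDecision decisions "1" "0") with hs01
  set s10 := pvScore (pvGetDecision decisions "1" "0") (pvGetDecision decisions "0" "1") with hs10
  have k1 : ((D0.modify "0" 0 (· + s01)).modify "1" 0 (· + s10)).keys = ["0", "1", "2"] := by
    rw [pv_keys_modify_contains, pv_keys_modify_contains] <;>
      simp [hD0, PySem.Dict.contains_modify, PySem.Dict.keys]
  have e2 := pv_stepA_eq_modify decisions ((D0.modify "0" 0 (· + s01)).modify "1" 0 (· + s10)) ("0", "2")
    (by rw [k1]; decide)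
    (by simp [hD0, PySem.Dict.contains_modify])
    (by simp [hD0, PySem.Dict.contains_modify])
  rw [e2]
  set s02 := pvScore (pvGetDecision decisions "0" "2") (pvGetDecision decisions "2" "0") with hs02
  set s20 := pvScore (pvGetDecision decisions "2" "0") (pvGetDecision decisions "0" "2") with hs20
  set D1 := (D0.modify "0" 0 (· + s01)).modify "1" 0 (· + s10) with hD1
  have k2 : ((D1.modify "0" 0 (· + s02)).modify "2" 0 (· + s20)).keys = ["0", "1", "2"] := by
    rw [pv_keys_modify_contains, pv_keys_modify_contains, k1] <;>
      simp [hD1, hD0, PySem.Dict.contains_modify]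
  have e3 := pv_stepA_eq_modify decisions ((D1.modify "0" 0 (· + s02)).modify "2" 0 (· + s20)) ("1", "2")
    (by rw [k2]; decide)
    (by simp [hD1, hD0, PySem.Dict.contains_modify])
    (by simp [hD1, hD0, PySem.Dict.contains_modify])
  rw [e3]
  simp only [hD1, hD0]
  simp [PySem.Dict.modify, PySem.Dict.insert, PySem.Dict.getD, PySem.Dict.get?,
        List.filter, List.sum]
  exact ⟨rfl, rfl, rfl⟩
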